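-- pv_equiv track=rewrite | github.com/GitCmurf/meminit | src/meminit/core/use_cases/migrate_ids.py | _allocate_next_id
-- ===== SOURCE A (Python) =====
-- from typing import Any, Dict, List, Optional, Tuple
--
-- def _allocate_next_id(
--
--     repo_prefix: str,
--     doc_type: str,
--     used_numbers: Dict[Tuple[str, str], List[int]],
--     next_numbers: Dict[Tuple[str, str], int],
-- ) -> str:
--     key = (repo_prefix, doc_type)
--     used_set = set(used_numbers.get(key, []))
--     n = next_numbers.get(key, 1)
--     while n in used_set:
--         n += 1
--     used_set.add(n)
--     used_numbers.setdefault(key, []).append(n)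
--     next_numbers[key] = n + 1
--     return f"{repo_prefix}-{doc_type}-{n:03d}"
-- ===== SOURCE B (Python) =====
-- def _allocate_next_id(
--     repo_prefix,
--     doc_type,
--     used_numbers,
--     next_numbers,
-- ):
--     key = (repo_prefix, doc_type)
--     n = next_numbers.get(key, 1)
--     for v in sorted(used_numbers.get(key, [])):
--         if v < n:
--             continue
--         if v == n:
--             n += 1
--         else:
--             break
--     used_numbers.setdefault(key, []).append(n)
--     next_numbers[key] = n + 1
--     return f"{repo_prefix}-{doc_type}-{n:03d}"
-- ===== Notes on version B (the rewrite author's own statement) =====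
-- stated objective: alternative
-- what changed: Replaces A's set-build plus repeated 'while n in used_set' membership probing with a single ordered pass over sorted(used): skip values below the watermark, advance past each value equal to the candidate, stop at the first gap; lookups, mutations and formatting unchanged.
import Mathlib
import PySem

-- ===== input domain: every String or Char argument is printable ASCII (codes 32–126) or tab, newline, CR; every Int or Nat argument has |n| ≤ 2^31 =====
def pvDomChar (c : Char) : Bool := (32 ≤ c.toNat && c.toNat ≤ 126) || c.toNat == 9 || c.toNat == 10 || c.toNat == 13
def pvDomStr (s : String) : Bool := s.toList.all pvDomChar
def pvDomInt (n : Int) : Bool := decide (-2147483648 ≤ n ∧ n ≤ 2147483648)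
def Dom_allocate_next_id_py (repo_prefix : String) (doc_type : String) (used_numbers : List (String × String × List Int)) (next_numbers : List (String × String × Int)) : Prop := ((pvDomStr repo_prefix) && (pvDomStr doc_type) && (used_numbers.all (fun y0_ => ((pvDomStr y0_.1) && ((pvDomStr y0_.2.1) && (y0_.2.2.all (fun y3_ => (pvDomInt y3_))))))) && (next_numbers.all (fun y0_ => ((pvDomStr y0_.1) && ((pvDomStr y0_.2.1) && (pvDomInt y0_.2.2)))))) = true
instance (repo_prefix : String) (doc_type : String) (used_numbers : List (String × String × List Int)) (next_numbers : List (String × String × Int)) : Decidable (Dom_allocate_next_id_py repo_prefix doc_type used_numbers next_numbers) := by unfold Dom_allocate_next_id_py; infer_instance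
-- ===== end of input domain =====

-- B replaces A's repeated set-membership while-loop with a single ordered pass over the
-- sorted used list (objective: alternative decomposition, same cost at this scale).
-- A also mutates used_numbers and next_numbers in place; B performs the SAME mutations
-- in Python, but the equivalence proved here is about the RETURN value only.

-- ===== PORT A =====

-- termination of A's 'while n in used_set: n += 1' loop: the count of used values ≥ n shrinks
theorem pvWhileFree_dec (l : List Int) (p : Int) (h : p ∈ l) :
    (l.filter (fun x => decide (p + 1 ≤ x))).length < (l.filter (fun x => decide (p ≤ x))).length := by
  have h1 : l.filter (fun x => decide (p + 1 ≤ x))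
      = (l.filter (fun x => decide (p ≤ x))).filter (fun x => decide (p + 1 ≤ x)) := by
    rw [List.filter_filter]
    apply List.filter_congr
    intro x hx; simp; omega
  rw [h1, List.length_filter_lt_length_iff_exists]
  exact ⟨p, by simp [h], by simp⟩

-- 'while n in used_set: n += 1'
def pvWhileFree (usedSet : List Int) (n : Int) : Int :=
  if h : n ∈ usedSet then pvWhileFree usedSet (n + 1) else n
termination_by (usedSet.filter (fun x => decide (n ≤ x))).length
decreasing_by exact pvWhileFree_dec usedSet n h

def allocate_next_id_py (repo_prefix : String) (doc_type : String) (used_numbers : List (String × String × List Int)) (next_numbers : List (String × String × Int)) : String :=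
  -- key = (repo_prefix, doc_type); the flat entries (k1, k2, v) are the dict entries ((k1, k2), v)
  let used := PySem.Dict.getD ⟨used_numbers.map (fun e => ((e.1, e.2.1), e.2.2))⟩ (repo_prefix, doc_type) []
  let usedSet := PySem.Set.ofList used
  let n0 := PySem.Dict.getD ⟨next_numbers.map (fun e => ((e.1, e.2.1), e.2.2))⟩ (repo_prefix, doc_type) 1
  let n := pvWhileFree usedSet n0
  -- in-place appends to used_numbers / next_numbers have no effect on the return value
  -- f"{repo_prefix}-{doc_type}-{n:03d}": 03d = str(n).zfill(3) (sign counts toward the width)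
  repo_prefix ++ "-" ++ doc_type ++ "-" ++ PySem.Str.zfill (PySem.Int.toStr n) 3

-- ===== PORT B =====

-- one ordered pass: skip used values below n, advance past each value equal to n, stop at a gap
def pvScanFree (sortedUsed : List Int) (n : Int) : Int :=
  match sortedUsed with
  | [] => n
  | v :: rest =>
      if v < n then pvScanFree rest n
      else if v = n then pvScanFree rest (n + 1)
      else n

def allocate_next_id_py_alt (repo_prefix : String) (doc_type : String) (used_numbers : List (String × String × List Int)) (next_numbers : List (String × String × Int)) : String :=
  let used := PySem.Dict.getD ⟨used_numbers.map (fun e => ((e.1, e.2.1), e.2.2))⟩ (repo_prefix, doc_type) []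
  let n0 := PySem.Dict.getD ⟨next_numbers.map (fun e => ((e.1, e.2.1), e.2.2))⟩ (repo_prefix, doc_type) 1
  let n := pvScanFree (PySem.List.sorted used (fun x => x) false) n0
  repo_prefix ++ "-" ++ doc_type ++ "-" ++ PySem.Str.zfill (PySem.Int.toStr n) 3

-- ===== PRECONDITION & SPEC =====
def Spec_allocate_next_id_py (repo_prefix : String) (doc_type : String) (used_numbers : List (String × String × List Int)) (next_numbers : List (String × String × Int)) (out : String) : Prop := out = allocate_next_id_py_alt repo_prefix doc_type used_numbers next_numbers
instance (repo_prefix : String) (doc_type : String) (used_numbers : List (String × String × List Int)) (next_numbers : List (String × String × Int)) (out : String) : Decidable (Spec_allocate_next_id_py repo_prefix doc_type used_numbers next_numbers out) := by unfold Spec_allocate_next_id_py; infer_instance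

-- ===== CLAIM (what is proved, stated in full; the proofs are below) =====
def Claim_equal_allocate_next_id_py : Prop := ∀ (repo_prefix : String) (doc_type : String) (used_numbers : List (String × String × List Int)) (next_numbers : List (String × String × Int)), Dom_allocate_next_id_py repo_prefix doc_type used_numbers next_numbers → Spec_allocate_next_id_py repo_prefix doc_type used_numbers next_numbers (allocate_next_id_py repo_prefix doc_type used_numbers next_numbers)

-- ===== LEMMAS AND PROOFS =====

-- A's loop returns the least n' ≥ n outside the list
theorem pvWhileFree_char (usedSet : List Int) (n : Int) :
    n ≤ pvWhileFree usedSet n ∧ pvWhileFree usedSet n ∉ usedSet ∧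
      ∀ m, n ≤ m → m < pvWhileFree usedSet n → m ∈ usedSet := by
  fun_induction pvWhileFree usedSet n with
  | case1 n h ih =>
      obtain ⟨h1, h2, h3⟩ := ih
      refine ⟨by omega, h2, ?_⟩
      intro m hm1 hm2
      by_cases hmn : m = n
      · exact hmn ▸ h
      · exact h3 m (by omega) hm2
  | case2 n h =>
      exact ⟨le_refl _, h, fun m h1 h2 => absurd (lt_of_le_of_lt h1 h2) (lt_irrefl _)⟩

-- B's scan returns the least n' ≥ n outside a (≤-sorted) list
theorem pvScanFree_char (s : List Int) (n : Int) (hs : s.Pairwise (· ≤ ·)) :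
    n ≤ pvScanFree s n ∧ pvScanFree s n ∉ s ∧
      ∀ m, n ≤ m → m < pvScanFree s n → m ∈ s := by
  induction s generalizing n with
  | nil => exact ⟨le_refl _, by simp, fun m h1 h2 => absurd (lt_of_le_of_lt h1 h2) (lt_irrefl _)⟩
  | cons v rest ih =>
      have hrest : rest.Pairwise (· ≤ ·) := (List.pairwise_cons.mp hs).2
      have hhead : ∀ x ∈ rest, v ≤ x := (List.pairwise_cons.mp hs).1
      by_cases h1 : v < n
      · obtain ⟨c1, c2, c3⟩ := ih n hrest
        simp only [pvScanFree, if_pos h1]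
        refine ⟨c1, ?_, ?_⟩
        · simp only [List.mem_cons, not_or]
          exact ⟨by omega, c2⟩
        · intro m hm1 hm2
          exact List.mem_cons_of_mem v (c3 m hm1 hm2)
      · by_cases h2 : v = n
        · obtain ⟨c1, c2, c3⟩ := ih (n + 1) hrest
          simp only [pvScanFree, if_neg h1, if_pos h2]
          refine ⟨by omega, ?_, ?_⟩
          · simp only [List.mem_cons, not_or]
            exact ⟨by omega, c2⟩
          · intro m hm1 hm2
            by_cases hmn : m = n
            · exact hmn ▸ h2 ▸ List.mem_cons_self
            · exact List.mem_cons_of_mem v (c3 m (by omega) hm2)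
        · simp only [pvScanFree, if_neg h1, if_neg h2]
          refine ⟨le_refl _, ?_, ?_⟩
          · simp only [List.mem_cons, not_or]
            refine ⟨fun h => h2 h.symm, fun hmem => ?_⟩
            have := hhead n hmem
            omega
          · intro m hm1 hm2
            exact absurd (lt_of_le_of_lt hm1 hm2) (lt_irrefl _)

-- the two loops agree: both compute the least free number ≥ n among the used values
theorem loops_agree (used : List Int) (n : Int) :
    pvWhileFree (PySem.Set.ofList used) n = pvScanFree (PySem.List.sorted used (fun x => x) false) n := by
  obtain ⟨a1, a2, a3⟩ := pvWhileFree_char (PySem.Set.ofList used) n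
  obtain ⟨b1, b2, b3⟩ := pvScanFree_char (PySem.List.sorted used (fun x => x) false) n
    (PySem.List.sorted_pairwise used (fun x => x))
  set a := pvWhileFree (PySem.Set.ofList used) n
  set b := pvScanFree (PySem.List.sorted used (fun x => x) false) n
  have hmemA : ∀ x, x ∈ PySem.Set.ofList used ↔ x ∈ used := fun x => PySem.Set.mem_ofList used x
  have hmemB : ∀ x, x ∈ PySem.List.sorted used (fun y => y) false ↔ x ∈ used :=
    fun x => PySem.List.mem_sorted used (fun y => y) false x
  rcases lt_trichotomy a b with h | h | h
  · exact absurd ((hmemA a).mpr ((hmemB a).mp (b3 a a1 h))) a2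
  · exact h
  · exact absurd ((hmemB b).mpr ((hmemA b).mp (a3 b b1 h))) b2

-- ===== VERDICT (by name: the statement is the Claim_ definition above) =====
theorem allocate_next_id_py_spec : Claim_equal_allocate_next_id_py := by
  intro rp dt un nn _
  unfold Spec_allocate_next_id_py allocate_next_id_py allocate_next_id_py_alt
  simp only [loops_agree]
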